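-- pv_equiv track=rewrite | github.com/pail23/home_assistant_delonghi_primadonna | custom_components/delonghi_primadonna/device.py | sign_request
-- ===== SOURCE A (Python) =====
-- def sign_request(message):
--     """Request signer"""
--     deviser = 0x1d0f
--     for item in message[:len(message) - 2]:
--         i3 = (((deviser << 8) | (deviser >> 8)) &
--               0x0000ffff) ^ (item & 0xffff)
--         i4 = i3 ^ ((i3 & 0xff) >> 4)
--         i5 = i4 ^ ((i4 << 12) & 0x0000ffff)
--         deviser = i5 ^ (((i5 & 0xff) << 5) & 0x0000ffff)
--     signature = list((deviser & 0x0000ffff).to_bytes(2, byteorder='big'))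
--     message[len(message) - 2] = signature[0]
--     message[len(message) - 1] = signature[1]
--     return message
-- ===== SOURCE B (Python) =====
-- def sign_request(message):
--     """Request signer: bit-serial CRC-16/CCITT (poly 0x1021, init 0x1d0f).
--     Returns a new list (does not mutate the argument, unlike A)."""
--     crc = 0x1d0f
--     body = message[:len(message) - 2]
--     for item in body:
--         m = item & 0xffff
--         crc ^= ((m << 8) | (m >> 8)) & 0xffff
--         for _ in range(8):
--             if crc & 0x8000:
--                 crc = ((crc << 1) ^ 0x1021) & 0xffff
--             else:
--                 crc = (crc << 1) & 0xffff
--     return body + [crc >> 8, crc & 0xff]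
-- ===== Notes on version B (the rewrite author's own statement) =====
-- stated objective: alternative
-- what changed: Replaces A's folded nibble-trick CRC byte update with the classic bit-serial CRC-16/CCITT inner loop (8 shift-and-conditional-xor rounds with poly 0x1021 after xoring in the byteswapped masked item) and builds a fresh body+checksum list instead of writing the two checksum bytes into the argument in place.
-- intended difference: On one-element lists A's message[-2] wraps around to the single cell which the next write overwrites, so A returns the 1-element list [15] (low checksum byte only); B returns [29, 15], the empty body plus both checksum bytes, which is the intended checksum of an empty payload. — e.g. on sign_request([7]): A returns [15], B returns [29, 15]
import Mathlib
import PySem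

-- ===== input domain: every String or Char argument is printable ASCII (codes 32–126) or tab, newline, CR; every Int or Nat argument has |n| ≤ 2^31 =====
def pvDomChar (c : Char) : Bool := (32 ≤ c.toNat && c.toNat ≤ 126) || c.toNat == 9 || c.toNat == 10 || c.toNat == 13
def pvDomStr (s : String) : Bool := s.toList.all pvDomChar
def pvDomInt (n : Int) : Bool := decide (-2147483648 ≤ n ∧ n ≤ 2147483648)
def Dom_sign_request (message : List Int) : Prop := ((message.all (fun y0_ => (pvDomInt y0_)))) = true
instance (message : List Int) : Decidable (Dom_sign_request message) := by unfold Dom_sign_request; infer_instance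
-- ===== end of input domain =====

-- B replaces A's folded per-byte CRC bit arithmetic with the classic bit-serial CRC-16/CCITT
-- (poly 0x1021) inner loop and builds a fresh output list instead of writing into the argument
-- (A mutates its argument in place; the equivalence proved here is about the RETURN value only).

-- ===== PORT A =====
-- per-item update of `deviser` (body of A's for-loop)
def stepA (deviser item : Int) : Int :=
  let i3 := PySem.Int.bxor (PySem.Int.band (PySem.Int.bor (deviser <<< (8 : Nat)) (deviser >>> (8 : Nat))) 65535)
              (PySem.Int.band item 65535)
  let i4 := PySem.Int.bxor i3 ((PySem.Int.band i3 255) >>> (4 : Nat))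
  let i5 := PySem.Int.bxor i4 (PySem.Int.band (i4 <<< (12 : Nat)) 65535)
  PySem.Int.bxor i5 (PySem.Int.band ((PySem.Int.band i5 255) <<< (5 : Nat)) 65535)

def sign_request (message : List Int) : List Int :=
  let deviser : Int := 0x1d0f
  let deviser := (PySem.List.slice message none (some ((message.length : Int) - 2))).foldl stepA deviser
  -- list((deviser & 0xffff).to_bytes(2, byteorder='big')) ported by hand:
  -- big-endian bytes [v >> 8, v & 0xff]; exact since 0 ≤ deviser & 0xffff < 2^16
  let signature : List Int := [(PySem.Int.band deviser 65535) >>> (8 : Nat),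
                               PySem.Int.band (PySem.Int.band deviser 65535) 255]
  match PySem.List.pyIdx? message.length ((message.length : Int) - 2) with
  | none => []  -- IndexError on message = []; excluded by Pre_
  | some i =>
    let m1 := message.set i (signature[0]!)
    match PySem.List.pyIdx? m1.length ((m1.length : Int) - 1) with
    | none => []  -- unreachable
    | some j => m1.set j (signature[1]!)

-- ===== PORT B =====
-- one shift-and-conditional-xor round (body of B's `for _ in range(8)`)
def crcRound (c : Int) : Int :=
  if PySem.Int.band c 32768 ≠ 0 then PySem.Int.band (PySem.Int.bxor (c <<< (1 : Nat)) 4129) 65535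
  else PySem.Int.band (c <<< (1 : Nat)) 65535

-- per-item update of `crc` (body of B's for-loop)
def stepB (crc item : Int) : Int :=
  let m := PySem.Int.band item 65535
  let crc := PySem.Int.bxor crc (PySem.Int.band (PySem.Int.bor (m <<< (8 : Nat)) (m >>> (8 : Nat))) 65535)
  (List.range 8).foldl (fun c _ => crcRound c) crc

def sign_request_alt (message : List Int) : List Int :=
  let body := PySem.List.slice message none (some ((message.length : Int) - 2))
  let crc := body.foldl stepB (0x1d0f : Int)
  body ++ [crc >>> (8 : Nat), PySem.Int.band crc 255]

-- ===== PRECONDITION & SPEC =====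
-- Pre_ excludes only the empty list, on which A raises IndexError at `message[-2] = …`.
def Pre_sign_request (message : List Int) : Prop := message ≠ []
instance (message : List Int) : Decidable (Pre_sign_request message) := by unfold Pre_sign_request; infer_instance
def pvWitness_sign_request : List Int := [1, 2]

-- On one-element lists A's `message[-2]` wraps around to the single cell, which is then
-- overwritten again, so A returns the 1-element list [15] (low checksum byte only); B returns
-- the intended empty body plus both checksum bytes, [29, 15].
def D_sign_request (message : List Int) : Prop := message.length = 1
instance (message : List Int) : Decidable (D_sign_request message) := by unfold D_sign_request; infer_instance
def Spec_sign_request (message : List Int) (out : List Int) : Prop := ¬ D_sign_request message → out = sign_request_alt message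
instance (message : List Int) (out : List Int) : Decidable (Spec_sign_request message out) := by unfold Spec_sign_request; infer_instance
def pvDiffWitness_sign_request : List Int := [7]
def pvDiffWitnessOut_sign_request : (List Int) × (List Int) := ([15], [29, 15])

-- ===== CLAIM (what is proved, stated in full; the proofs are below) =====
def Claim_unchanged_sign_request : Prop := ∀ (message : List Int), Dom_sign_request message → Pre_sign_request message → Spec_sign_request message (sign_request message)
def Claim_changed_sign_request : Prop := Dom_sign_request (pvDiffWitness_sign_request) ∧ Pre_sign_request (pvDiffWitness_sign_request) ∧ D_sign_request (pvDiffWitness_sign_request) ∧ sign_request (pvDiffWitness_sign_request) = pvDiffWitnessOut_sign_request.1 ∧ sign_request_alt (pvDiffWitness_sign_request) = pvDiffWitnessOut_sign_request.2 ∧ pvDiffWitnessOut_sign_request.1 ≠ pvDiffWitnessOut_sign_request.2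
def Claim_exact_sign_request : Prop := ∀ (message : List Int), Dom_sign_request message → Pre_sign_request message → D_sign_request message → sign_request message ≠ sign_request_alt message

-- ===== LEMMAS AND PROOFS =====

-- Nat-level models of the two per-item updates
def trickN (t : Nat) : Nat :=
  let i4 := t ^^^ ((t &&& 255) >>> 4)
  let i5 := i4 ^^^ ((i4 <<< 12) &&& 65535)
  i5 ^^^ (((i5 &&& 255) <<< 5) &&& 65535)

def roundN (c : Nat) : Nat :=
  if c &&& 32768 ≠ 0 then ((c <<< 1) ^^^ 4129) &&& 65535 else (c <<< 1) &&& 65535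

def serialN (c : Nat) : Nat :=
  roundN (roundN (roundN (roundN (roundN (roundN (roundN (roundN c)))))))

def stepAN (c m : Nat) : Nat := trickN ((((c <<< 8) ||| (c >>> 8)) &&& 65535) ^^^ m)
def stepBN (c m : Nat) : Nat := serialN (c ^^^ ((((m <<< 8) ||| (m >>> 8)) &&& 65535)))

-- the 256-case core: the nibble trick on a bare low byte equals eight serial rounds on the byte in high position
set_option maxRecDepth 2000 in
theorem key256 : ∀ h : Fin 256, trickN h.val = serialN (256 * h.val) := by decide

theorem mask_mod (n : Nat) : n &&& 65535 = n % 65536 := by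
  have := Nat.and_two_pow_sub_one_eq_mod n 16; norm_num at this; exact this

theorem mask_mod8 (n : Nat) : n &&& 255 = n % 256 := by
  have := Nat.and_two_pow_sub_one_eq_mod n 8; norm_num at this; exact this


-- bit-level toolkit
theorem tb_mul (a i : Nat) : (256 * a).testBit i = (decide (i ≥ 8) && a.testBit (i - 8)) := by
  have := @Nat.testBit_two_pow_mul 8 a i; norm_num at this ⊢; exact this

theorem tb_add (a b : Nat) (hb : b < 256) (i : Nat) :
    (256 * a + b).testBit i = if i < 8 then b.testBit i else a.testBit (i - 8) := by
  have := Nat.testBit_two_pow_mul_add a (b := b) (i := 8) (by omega) i; norm_num at this ⊢; exact this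

theorem tb_small (b i : Nat) (hb : b < 256) (hi : 8 ≤ i) : b.testBit i = false :=
  Nat.testBit_eq_false_of_lt (lt_of_lt_of_le hb (by calc (256:Nat) = 2^8 := by norm_num
                                                      _ ≤ 2^i := Nat.pow_le_pow_right (by norm_num) hi))

theorem shl8 (a : Nat) : a <<< 8 = 256 * a := by rw [Nat.shiftLeft_eq]; omega

theorem shr8 (a : Nat) : a >>> 8 = a / 256 := by rw [Nat.shiftRight_eq_div_pow]

theorem byteXor (a b : Nat) (hb : b < 256) : 256 * a ^^^ b = 256 * a + b := by
  apply Nat.eq_of_testBit_eq; intro i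
  rw [tb_add a b hb i]
  by_cases hi : i < 8 <;>
    simp [Nat.testBit_xor, tb_mul, hi, Nat.not_le.mpr, Nat.le_of_not_lt, tb_small b i hb]

theorem byteOr (a b : Nat) (hb : b < 256) : 256 * a ||| b = 256 * a + b := by
  apply Nat.eq_of_testBit_eq; intro i
  rw [tb_add a b hb i]
  by_cases hi : i < 8 <;>
    simp [Nat.testBit_or, tb_mul, hi, Nat.not_le.mpr, Nat.le_of_not_lt, tb_small b i hb]

theorem swap_arith (x : Nat) (hx : x < 65536) :
    ((x <<< 8) ||| (x >>> 8)) &&& 65535 = 256 * (x % 256) + x / 256 := by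
  rw [shl8, shr8, Nat.and_or_distrib_right, mask_mod, mask_mod]
  rw [Nat.mod_eq_of_lt (by omega : x / 256 < 65536)]
  have h : 256 * x % 65536 = 256 * (x % 256) := by omega
  rw [h, byteOr _ _ (by omega)]

theorem xorBytes (a b c d : Nat) (hb : b < 256) (hd : d < 256) :
    (256 * a + b) ^^^ (256 * c + d) = 256 * (a ^^^ c) + (b ^^^ d) := by
  rw [← byteXor a b hb, ← byteXor c d hd,
    ← byteXor (a ^^^ c) (b ^^^ d) (Nat.xor_lt_two_pow (n := 8) (by omega) (by omega))]
  have h2 : ∀ u v : Nat, 256 * u ^^^ 256 * v = 256 * (u ^^^ v) := by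
    intro u v
    have := Nat.shiftLeft_xor_distrib (a := u) (b := v) (i := 8)
    simpa [shl8] using this.symm
  calc (256*a ^^^ b) ^^^ (256*c ^^^ d) = (256*a ^^^ 256*c) ^^^ (b ^^^ d) := by
        rw [Nat.xor_assoc, Nat.xor_assoc]; congr 1
        rw [← Nat.xor_assoc, Nat.xor_comm b (256*c), Nat.xor_assoc]
    _ = 256 * (a ^^^ c) ^^^ (b ^^^ d) := by rw [h2]

theorem trick_shift (H L : Nat) (hH : H < 256) :
    trickN (256 * L + H) = trickN H ^^^ 256 * L := by
  have hyH : 256 * L + H = H ^^^ 256 * L := by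
    rw [Nat.xor_comm, byteXor _ _ hH]
  have hmask : ∀ z : Nat, (z ^^^ 256 * L) &&& 255 = z &&& 255 := by
    intro z
    rw [Nat.and_xor_distrib_right, mask_mod8 (256*L)]
    simp [Nat.mul_mod_right]
  have hmask12 : ((256 * L) <<< 12) &&& 65535 = 0 := by
    rw [Nat.shiftLeft_eq, mask_mod]; norm_num; omega
  unfold trickN
  rw [hyH]
  simp only [hmask]
  rw [Nat.xor_assoc H, Nat.xor_comm (256*L), ← Nat.xor_assoc H]
  generalize (H ^^^ (H &&& 255) >>> 4) = i4
  rw [Nat.shiftLeft_xor_distrib, Nat.and_xor_distrib_right, hmask12, Nat.xor_zero]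
  rw [Nat.xor_assoc i4, Nat.xor_comm (256*L), ← Nat.xor_assoc i4]
  generalize (i4 ^^^ (i4 <<< 12) &&& 65535) = i5
  rw [Nat.xor_assoc i5, Nat.xor_comm (256*L), ← Nat.xor_assoc i5, hmask i5]

theorem round_shift (a b : Nat) (hb : b < 32768) :
    roundN (a ^^^ b) = roundN a ^^^ 2 * b := by
  have hcond : (a ^^^ b) &&& 32768 = a &&& 32768 := by
    apply Nat.eq_of_testBit_eq; intro i
    by_cases hi : i = 15
    · subst hi
      have hb15 : b.testBit 15 = false := Nat.testBit_eq_false_of_lt (by norm_num; omega)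
      simp [Nat.testBit_and, Nat.testBit_xor, hb15]
    · have h32 : (32768 : Nat).testBit i = false := by
        have h2 : (32768 : Nat) = 2^15 := by norm_num
        rw [h2, Nat.testBit_two_pow]; simp [Ne.symm hi]
      simp [Nat.testBit_and, h32]
  have hshift : ((a ^^^ b) <<< 1) = (a <<< 1) ^^^ (b <<< 1) := Nat.shiftLeft_xor_distrib
  have hb2 : (b <<< 1) &&& 65535 = 2 * b := by
    rw [Nat.shiftLeft_eq, mask_mod]; norm_num; omega
  unfold roundN
  rw [hcond, hshift]
  split
  · rw [Nat.xor_assoc, Nat.xor_comm (b <<< 1), ← Nat.xor_assoc, Nat.and_xor_distrib_right, hb2]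
  · rw [Nat.and_xor_distrib_right, hb2]

theorem serial_shift (a l : Nat) (hl : l < 256) :
    serialN (a ^^^ l) = serialN a ^^^ 256 * l := by
  unfold serialN
  rw [round_shift a l (by omega)]
  rw [round_shift _ (2*l) (by omega)]
  rw [round_shift _ (2*(2*l)) (by omega)]
  rw [round_shift _ (2*(2*(2*l))) (by omega)]
  rw [round_shift _ (2*(2*(2*(2*l)))) (by omega)]
  rw [round_shift _ (2*(2*(2*(2*(2*l))))) (by omega)]
  rw [round_shift _ (2*(2*(2*(2*(2*(2*l)))))) (by omega)]
  rw [round_shift _ (2*(2*(2*(2*(2*(2*(2*l))))))) (by omega)]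
  congr 1; ring

theorem roundN_lt (c : Nat) : roundN c < 65536 := by
  unfold roundN; split <;> rw [mask_mod] <;> omega

theorem serialN_lt (c : Nat) : serialN c < 65536 := roundN_lt _

theorem stepN_eq (c m : Nat) (hc : c < 65536) (hm : m < 65536) : stepAN c m = stepBN c m := by
  have hL : c % 256 ^^^ m / 256 < 256 := Nat.xor_lt_two_pow (n := 8) (by omega) (by omega)
  have hH : c / 256 ^^^ m % 256 < 256 := Nat.xor_lt_two_pow (n := 8) (by omega) (by omega)
  unfold stepAN stepBN
  rw [swap_arith c hc, swap_arith m hm]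
  conv_lhs => rw [show m = 256 * (m / 256) + m % 256 by omega]
  conv_rhs => rw [show c = 256 * (c / 256) + c % 256 by omega]
  rw [xorBytes _ _ _ _ (by omega) (by omega), xorBytes _ _ _ _ (by omega) (by omega)]
  rw [trick_shift _ _ hH]
  rw [show 256 * (c / 256 ^^^ m % 256) + (c % 256 ^^^ m / 256)
      = 256 * (c / 256 ^^^ m % 256) ^^^ (c % 256 ^^^ m / 256) from (byteXor _ _ hL).symm]
  rw [serial_shift _ _ hL]
  rw [key256 ⟨c / 256 ^^^ m % 256, hH⟩]

theorem stepBN_lt (c m : Nat) : stepBN c m < 65536 := serialN_lt _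

-- Int-to-Nat bridges
theorem band_mask (a : Int) : 0 ≤ PySem.Int.band a 65535 ∧ PySem.Int.band a 65535 < 65536 := by
  unfold PySem.Int.band
  split_ifs with h1 h2 h2
  · have h : a.toNat &&& (65535:Int).toNat ≤ (65535:Int).toNat := Nat.and_le_right
    have h65 : ((65535:Int).toNat) = 65535 := rfl
    rw [h65] at h
    constructor
    · positivity
    · exact_mod_cast Nat.lt_of_le_of_lt h (by norm_num)
  · omega
  · have h65 : ((65535:Int).toNat) = 65535 := rfl
    rw [h65]
    constructor
    · positivity
    · have h : (65535:Nat) - (65535 &&& (-a-1).toNat) ≤ 65535 := by omega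
      exact_mod_cast Nat.lt_of_le_of_lt h (by norm_num)
  · omega

theorem stepA_cast (c : Nat) (item : Int) :
    stepA (c : Int) item = (stepAN c (PySem.Int.band item 65535).toNat : Nat) := by
  obtain ⟨h0, -⟩ := band_mask item
  have hm : PySem.Int.band item 65535 = (((PySem.Int.band item 65535).toNat : Nat) : Int) :=
    (Int.toNat_of_nonneg h0).symm
  unfold stepA stepAN trickN
  rw [hm]
  simp only [show (65535:Int) = ((65535:Nat):Int) from rfl, show (255:Int) = ((255:Nat):Int) from rfl,
    ← Int.natCast_shiftLeft, ← Int.natCast_shiftRight,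
    PySem.Int.band_natCast, PySem.Int.bor_natCast, PySem.Int.bxor_natCast, Int.toNat_natCast]

theorem crcRound_cast (c : Nat) : crcRound (c : Int) = ((roundN c : Nat) : Int) := by
  unfold crcRound roundN
  by_cases h : c &&& 32768 = 0 <;>
    simp only [show (65535:Int) = ((65535:Nat):Int) from rfl, show (32768:Int) = ((32768:Nat):Int) from rfl,
      show (4129:Int) = ((4129:Nat):Int) from rfl, ne_eq,
      ← Int.natCast_shiftLeft, PySem.Int.band_natCast, PySem.Int.bxor_natCast, Int.natCast_eq_zero, h] <;>
    simp

theorem stepB_cast (c : Nat) (item : Int) :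
    stepB (c : Int) item = (stepBN c (PySem.Int.band item 65535).toNat : Nat) := by
  obtain ⟨h0, -⟩ := band_mask item
  have hm : PySem.Int.band item 65535 = (((PySem.Int.band item 65535).toNat : Nat) : Int) :=
    (Int.toNat_of_nonneg h0).symm
  unfold stepB stepBN serialN
  rw [hm]
  simp only [show (65535:Int) = ((65535:Nat):Int) from rfl,
    ← Int.natCast_shiftLeft, ← Int.natCast_shiftRight,
    PySem.Int.band_natCast, PySem.Int.bor_natCast, PySem.Int.bxor_natCast, Int.toNat_natCast,
    List.range_succ, List.foldl_append, List.foldl_cons, List.foldl_nil, List.range_zero,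
    crcRound_cast]

theorem fold_both (xs : List Int) : ∀ (c : Nat), c < 65536 →
    ∃ c' : Nat, c' < 65536 ∧ xs.foldl stepA (c : Int) = (c' : Int) ∧ xs.foldl stepB (c : Int) = (c' : Int) := by
  induction xs with
  | nil => exact fun c hc => ⟨c, hc, rfl, rfl⟩
  | cons x xs ih =>
    intro c hc
    obtain ⟨h0, hlt⟩ := band_mask x
    have hm : (PySem.Int.band x 65535).toNat < 65536 := by omega
    have hstep : stepA (c : Int) x = stepB (c : Int) x := by
      rw [stepA_cast, stepB_cast, stepN_eq c _ hc hm]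
    obtain ⟨c', hc', hA, hB⟩ := ih (stepBN c (PySem.Int.band x 65535).toNat) (stepBN_lt _ _)
    refine ⟨c', hc', ?_, ?_⟩
    · simpa [List.foldl_cons, hstep, stepB_cast] using hA
    · simpa [List.foldl_cons, stepB_cast] using hB

theorem set_set_last : ∀ (xs : List Int) (a b : Int), 2 ≤ xs.length →
    (xs.set (xs.length - 2) a).set (xs.length - 1) b = xs.take (xs.length - 2) ++ [a, b] := by
  intro xs
  induction xs with
  | nil => intro a b h; simp at h
  | cons x t ih =>
    intro a b h
    by_cases ht : t.length ≤ 1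
    · have h1 : t.length = 1 := by simp at h; omega
      obtain ⟨y, rfl⟩ := List.length_eq_one_iff.mp h1
      rfl
    · have h2 : 2 ≤ t.length := by omega
      have e1 : (x :: t).length - 2 = (t.length - 2) + 1 := by simp; omega
      have e2 : (x :: t).length - 1 = (t.length - 1) + 1 := by simp; omega
      have e3 : t.length - 1 = (t.length - 2) + 1 := by omega
      rw [e1, e2, List.set_cons_succ, List.set_cons_succ, List.take_succ_cons, ih a b h2]
      simp

-- ===== VERDICT (by name: the statement is the Claim_ definition above) =====
theorem sign_request_spec : Claim_unchanged_sign_request := by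
  intro message _ hpre hnD
  unfold Pre_sign_request at hpre
  unfold D_sign_request at hnD
  have hn1 : 1 ≤ message.length := by
    cases message with
    | nil => exact absurd rfl hpre
    | cons x t => simp
  have hn : 2 ≤ message.length := by omega
  have hslice : PySem.List.slice message none (some ((message.length : Int) - 2))
      = message.take (message.length - 2) := by
    rw [PySem.List.slice_to message (by omega : (0:Int) ≤ (message.length : Int) - 2)]
    congr 1; omega
  obtain ⟨c', hc', hA, hB⟩ := fold_both (message.take (message.length - 2)) 7439 (by norm_num)
  have hidx1 : PySem.List.pyIdx? message.length ((message.length : Int) - 2)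
      = some (message.length - 2) := by
    unfold PySem.List.pyIdx?
    rw [if_pos (by omega), if_pos (by omega)]
    congr 1; omega
  have hidx2 : PySem.List.pyIdx? message.length ((message.length : Int) - 1)
      = some (message.length - 1) := by
    unfold PySem.List.pyIdx?
    rw [if_pos (by omega), if_pos (by omega)]
    congr 1; omega
  have hband : PySem.Int.band ((c' : Nat) : Int) 65535 = ((c' : Nat) : Int) := by
    rw [show (65535:Int) = ((65535:Nat):Int) from rfl, PySem.Int.band_natCast, mask_mod,
      Nat.mod_eq_of_lt hc']
  unfold sign_request sign_request_alt
  simp only [hslice, show (7439:Int) = ((7439:Nat):Int) from rfl, hA, hB, hband,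
    List.length_set, hidx1, hidx2]
  rw [set_set_last message _ _ hn]
  simp

theorem sign_request_changed : Claim_changed_sign_request := by
  unfold Claim_changed_sign_request; decide

theorem sign_request_tight : Claim_exact_sign_request := by
  intro message _ _ hD heq
  unfold D_sign_request at hD
  obtain ⟨a, rfl⟩ := List.length_eq_one_iff.mp hD
  have h1 : (sign_request [a]).length = 1 := by
    unfold sign_request
    norm_num [PySem.List.pyIdx?]
  have h2 : 2 ≤ (sign_request_alt [a]).length := by
    unfold sign_request_alt
    simp
  rw [heq] at h1
  omega
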